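-- pv_equiv track=rewrite | github.com/nicolasgoris/advent_of_code_2022 | day6.py | part1
-- ===== SOURCE A (Python) =====
-- from collections import Counter
--
-- def isUniqueChars(string):
--     # Counting frequency
--     freq = Counter(string)
--     if len(freq) == len(string):
--         return True
--     else:
--         return False
--
-- def part1(list):
--     i = 3
--     while i < len(list):
--         check = list[i - 3 : i + 1]
--         if isUniqueChars(check):
--             return i + 1
--         i += 1
--     return 0
-- ===== SOURCE B (Python) =====
-- def part1(list):
--     # Sliding-window scan: keep the last index of each char and the left edge
--     # of the longest all-distinct window ending at i; no per-window distinctness test.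
--     last = {}
--     start = 0
--     for i, c in enumerate(list):
--         p = last.get(c, -1)
--         if p >= start:
--             start = p + 1
--         last[c] = i
--         if i - start + 1 >= 4:
--             return i + 1
--     return 0
-- ===== Notes on version B (the rewrite author's own statement) =====
-- stated objective: faster
-- what changed: Replaces the per-window slice + Counter rebuild with the classic sliding-window scan that maintains a last-occurrence dict and a moving left edge, returning when the distinct window ending at i reaches length 4.
import Mathlib
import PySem

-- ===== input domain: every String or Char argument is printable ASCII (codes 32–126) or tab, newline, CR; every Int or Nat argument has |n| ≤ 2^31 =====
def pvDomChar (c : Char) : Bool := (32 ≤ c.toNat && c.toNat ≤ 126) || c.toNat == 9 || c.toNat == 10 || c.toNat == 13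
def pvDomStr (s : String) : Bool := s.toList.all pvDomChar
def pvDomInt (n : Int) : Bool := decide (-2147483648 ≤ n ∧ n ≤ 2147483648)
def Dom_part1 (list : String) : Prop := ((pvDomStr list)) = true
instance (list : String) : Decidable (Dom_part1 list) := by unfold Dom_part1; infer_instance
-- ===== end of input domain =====

-- B replaces A's per-window slice + Counter rebuild by the classic sliding-window scan
-- (last-occurrence dict + moving left edge): one dict update per character instead of a
-- fresh Counter per window (measured constant-factor speedup).

-- ===== PORT A =====
-- isUniqueChars: freq = Counter(string); len(freq) == len(string)
def isUniqueChars (cs : List Char) : Bool := (PySem.Dict.counter cs).size == cs.length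

-- while i < len(list): check = list[i-3:i+1]; if isUniqueChars(check): return i+1; i += 1; return 0
def part1Go (cs : List Char) (i : Nat) : Int :=
  if i < cs.length then
    if isUniqueChars (PySem.List.slice cs (some ((i : Int) - 3)) (some ((i : Int) + 1))) then
      (i : Int) + 1
    else
      part1Go cs (i + 1)
  else 0
termination_by cs.length - i

def part1 (list : String) : Int := part1Go list.toList 3

-- ===== PORT B =====
-- for i, c in enumerate(list): p = last.get(c, -1); if p >= start: start = p + 1;
--   last[c] = i; if i - start + 1 >= 4: return i + 1
-- return 0
def part1AltGo : List Char → Int → PySem.Dict Char Int → Int → Int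
  | [], _, _, _ => 0
  | c :: rest, i, last, start =>
    let p := last.getD c (-1)
    let start' := if start ≤ p then p + 1 else start
    let last' := last.insert c i
    if 4 ≤ i - start' + 1 then i + 1 else part1AltGo rest (i + 1) last' start'

def part1_alt (list : String) : Int := part1AltGo list.toList 0 PySem.Dict.empty 0

-- ===== PRECONDITION & SPEC =====
def Spec_part1 (list : String) (out : Int) : Prop := out = part1_alt list
instance (list : String) (out : Int) : Decidable (Spec_part1 list out) := by unfold Spec_part1; infer_instance

-- ===== CLAIM (what is proved, stated in full; the proofs are below) =====
def Claim_equal_part1 : Prop := ∀ (list : String), Dom_part1 list → Spec_part1 list (part1 list)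

-- ===== LEMMAS AND PROOFS =====

-- A's Counter-based distinctness test is exactly Nodup.
theorem isUnique_iff (l : List Char) : isUniqueChars l = true ↔ l.Nodup := by
  have hsize : (PySem.Dict.counter l).size = (PySem.Set.ofList l).length := by
    simp [PySem.Dict.size, PySem.Dict.items_counter]
  have hcard : (PySem.Set.ofList l).length = l.toFinset.card := by
    rw [← List.toFinset_card_of_nodup (PySem.Set.nodup_ofList l)]
    congr 1; ext x; simp [PySem.Set.mem_ofList]
  constructor
  · intro h
    simp only [isUniqueChars, beq_iff_eq, hsize, hcard] at h
    rw [List.card_toFinset] at h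
    have := List.Sublist.eq_of_length (List.dedup_sublist l) h
    rw [← this]; exact List.nodup_dedup l
  · intro h
    simp [isUniqueChars, hsize, hcard, List.toFinset_card_of_nodup h]

theorem mem_take_drop {cs : List Char} {n t : Nat} (hn : n ≤ cs.length) (x : Char) :
    x ∈ (cs.take n).drop t ↔ ∃ q, t ≤ q ∧ ∃ h : q < n, cs[q]'(lt_of_lt_of_le h hn) = x := by
  constructor
  · intro hx
    obtain ⟨j, hj, hje⟩ := List.mem_iff_getElem.1 hx
    have hjlt : t + j < n := by
      simp [List.length_drop, List.length_take] at hj; omega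
    refine ⟨t + j, by omega, hjlt, ?_⟩
    rw [← hje]
    simp [List.getElem_drop, List.getElem_take]
  · rintro ⟨q, htq, hqn, rfl⟩
    refine List.mem_iff_getElem.2 ⟨q - t, ?_, ?_⟩
    · simp [List.length_drop, List.length_take]; omega
    · simp only [List.getElem_drop, List.getElem_take]
      congr 1; omega

theorem go_main (cs : List Char) (n s : Nat) (last : PySem.Dict Char Int)
    (hn : n ≤ cs.length) (hsn : s ≤ n)
    (hW : ((cs.take n).drop s).Nodup)
    (hM : 0 < s → ∃ h : s - 1 < cs.length, cs[s-1] ∈ (cs.take n).drop s)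
    (hD1 : ∀ (ch : Char) (p : Int), last.get? ch = some p →
        ∃ pn : Nat, p = (pn : Int) ∧ pn < n ∧ ∃ h : pn < cs.length, cs[pn] = ch)
    (hD2 : ∀ (q : Nat) (h : q < n), ∃ p : Int,
        last.get? (cs[q]'(lt_of_lt_of_le h hn)) = some p ∧ (q : Int) ≤ p) :
    part1AltGo (cs.drop n) (n : Int) last (s : Int) = part1Go cs (max n 3) := by
  cases hd : cs.drop n with
  | nil =>
    have hlen : cs.length ≤ n := by
      have := congrArg List.length hd
      simp [List.length_drop] at this; omega
    rw [part1Go, if_neg (by omega)]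
    rfl
  | cons c rest =>
    have hnlt : n < cs.length := by
      have := congrArg List.length hd
      simp [List.length_drop] at this; omega
    have hcn : cs[n]'hnlt = c := by
      have h0 : (cs.drop n)[0]'(by rw [hd]; simp) = c := by simp [hd]
      rw [List.getElem_drop] at h0; simpa using h0
    have hdrest : cs.drop (n + 1) = rest := by
      have : cs.drop (n + 1) = (cs.drop n).drop 1 := by rw [List.drop_drop]
      rw [this, hd]; rfl
    have htake : cs.take (n+1) = cs.take n ++ [c] := by
      rw [List.take_add_one, List.getElem?_eq_getElem hnlt, hcn]; rfl
    -- shared continuation: for any new window start s' with the window invariants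
    suffices H : ∀ (s' : Nat), s' ≤ n →
        ((cs.take (n+1)).drop s').Nodup →
        (0 < s' → ∃ h : s' - 1 < cs.length, cs[s'-1] ∈ (cs.take (n+1)).drop s') →
        (if 4 ≤ (n:Int) - (s':Int) + 1 then (n:Int) + 1
         else part1AltGo rest ((n:Int) + 1) (last.insert c (n:Int)) (s':Int)) = part1Go cs (max n 3) by
      simp only [part1AltGo]
      by_cases hp : (s : Int) ≤ last.getD c (-1)
      · -- duplicate of c inside the window: jump start to pn + 1
        obtain ⟨pv, hget⟩ : ∃ pv, last.get? c = some pv := by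
          cases hone : last.get? c with
          | none =>
            exfalso
            rw [PySem.Dict.getD_eq_get?_getD, hone] at hp
            simp at hp; omega
          | some pv => exact ⟨pv, rfl⟩
        have hgd : last.getD c (-1) = pv := by
          rw [PySem.Dict.getD_eq_get?_getD, hget]; rfl
        obtain ⟨pn, hpv, hpnn, hpnlt, hpc⟩ := hD1 c pv hget
        have hspn : s ≤ pn := by rw [hgd, hpv] at hp; exact_mod_cast hp
        rw [if_pos hp, hgd, hpv]
        have hcast : (pn : Int) + 1 = ((pn + 1 : Nat) : Int) := by push_cast; ring
        rw [hcast]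
        apply H (pn + 1) (by omega)
        · -- window nodup
          rw [htake, List.drop_append_of_le_length (by simp [List.length_take]; omega)]
          have hX : ((cs.take n).drop (pn+1)).Nodup := by
            have : (cs.take n).drop (pn+1) = ((cs.take n).drop s).drop (pn+1-s) := by
              rw [List.drop_drop]; congr 1; omega
            rw [this]; exact List.Sublist.nodup (List.drop_sublist _ _) hW
          have hcX : c ∉ (cs.take n).drop (pn+1) := by
            intro hmem
            obtain ⟨q, hq1, hq2, hqe⟩ := (mem_take_drop hn c).1 hmem
            obtain ⟨p', hp'1, hp'2⟩ := hD2 q hq2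
            rw [hqe, hget] at hp'1
            have : (pn : Int) = p' := by rw [hpv] at hp'1; exact Option.some_inj.1 hp'1
            omega
          rw [List.nodup_append]
          refine ⟨hX, List.nodup_singleton c, ?_⟩
          intro a ha b hb
          rw [List.mem_singleton] at hb
          subst hb
          exact fun he => hcX (he ▸ ha)
        · -- maximality: cs[pn] = c is in the new window
          intro _
          refine ⟨by simpa using hpnlt, ?_⟩
          rw [htake, List.drop_append_of_le_length (by simp [List.length_take]; omega)]
          simp only [Nat.add_sub_cancel, hpc]
          exact List.mem_append_right _ (by simp)
      · -- c is fresh for the window: start unchanged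
        rw [if_neg hp]
        have hcW : c ∉ (cs.take n).drop s := by
          intro hmem
          obtain ⟨q, hq1, hq2, hqe⟩ := (mem_take_drop hn c).1 hmem
          obtain ⟨p', hp'1, hp'2⟩ := hD2 q hq2
          rw [hqe] at hp'1
          rw [PySem.Dict.getD_eq_get?_getD, hp'1] at hp
          simp at hp; omega
        have hWapp : (cs.take (n+1)).drop s = ((cs.take n).drop s) ++ [c] := by
          rw [htake, List.drop_append_of_le_length (by simp [List.length_take]; omega)]
        apply H s hsn
        · rw [hWapp]
          rw [List.nodup_append]
          refine ⟨hW, List.nodup_singleton c, ?_⟩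
          intro a ha b hb
          rw [List.mem_singleton] at hb
          subst hb
          exact fun he => hcW (he ▸ ha)
        · intro hs0
          obtain ⟨h1, h2⟩ := hM hs0
          exact ⟨h1, by rw [hWapp]; exact List.mem_append_left _ h2⟩
    -- proof of the continuation
    intro s' hs'n hW' hM'
    have hD1' : ∀ (ch : Char) (p : Int), (last.insert c (n:Int)).get? ch = some p →
        ∃ pn : Nat, p = (pn : Int) ∧ pn < n + 1 ∧ ∃ h : pn < cs.length, cs[pn] = ch := by
      intro ch p hg
      rw [PySem.Dict.get?_insert] at hg
      by_cases hch : ch = c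
      · rw [if_pos hch] at hg
        exact ⟨n, (Option.some_inj.1 hg).symm, by omega, hnlt, by rw [hcn, hch]⟩
      · rw [if_neg hch] at hg
        obtain ⟨pn, h1, h2, h3, h4⟩ := hD1 ch p hg
        exact ⟨pn, h1, by omega, h3, h4⟩
    have hD2' : ∀ (q : Nat) (h : q < n + 1), ∃ p : Int,
        (last.insert c (n:Int)).get? (cs[q]'(lt_of_lt_of_le h hnlt)) = some p ∧ (q : Int) ≤ p := by
      intro q hq
      by_cases hqn : q = n
      · subst hqn
        refine ⟨(q : Int), ?_, le_refl _⟩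
        rw [hcn]; exact PySem.Dict.get?_insert_self _ _ _
      · have hq' : q < n := by omega
        by_cases hqc : cs[q]'(lt_of_lt_of_le hq hnlt) = c
        · refine ⟨(n : Int), ?_, by exact_mod_cast (by omega : q ≤ n)⟩
          rw [hqc]; exact PySem.Dict.get?_insert_self _ _ _
        · obtain ⟨p', h1, h2⟩ := hD2 q hq'
          exact ⟨p', by rw [PySem.Dict.get?_insert, if_neg hqc]; exact h1, h2⟩
    by_cases hcond : s' + 3 ≤ n
    · -- window of length ≥ 4: both return n + 1
      rw [if_pos (by omega)]
      have hn3 : 3 ≤ n := by omega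
      have hmax : max n 3 = n := by omega
      rw [hmax, part1Go, if_pos hnlt]
      have hslice : PySem.List.slice cs (some ((n:Int) - 3)) (some ((n:Int) + 1))
          = (cs.drop (n-3)).take 4 := by
        have h1 : (n:Int) - 3 = ((n-3 : Nat) : Int) := by omega
        have h2 : (n:Int) + 1 = ((n-3 : Nat) : Int) + ((4:Nat) : Int) := by omega
        rw [h1, h2, PySem.List.slice_natCast_add]
      have hW4eq : (cs.drop (n-3)).take 4 = (cs.take (n+1)).drop (n-3) := by
        rw [List.drop_take]; congr 1; omega
      have hW4 : ((cs.drop (n-3)).take 4).Nodup := by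
        rw [hW4eq]
        have : (cs.take (n+1)).drop (n-3) = ((cs.take (n+1)).drop s').drop (n-3-s') := by
          rw [List.drop_drop]; congr 1; omega
        rw [this]; exact List.Sublist.nodup (List.drop_sublist _ _) hW'
      rw [hslice, if_pos ((isUnique_iff _).2 hW4)]
    · -- window still short: both continue
      rw [if_neg (by omega)]
      have hih := go_main cs (n+1) s' (last.insert c (n:Int)) hnlt (by omega) hW' hM' hD1' hD2'
      rw [hdrest] at hih
      have hcast : ((n+1 : Nat) : Int) = (n : Int) + 1 := by push_cast; ring
      rw [hcast] at hih
      rw [hih]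
      by_cases hn3 : 3 ≤ n
      · -- A's loop also fails the uniqueness test at n and advances
        have hmax : max n 3 = n := by omega
        have hmax' : max (n+1) 3 = n+1 := by omega
        rw [hmax, hmax']
        conv_rhs => rw [part1Go]
        rw [if_pos hnlt]
        have hslice : PySem.List.slice cs (some ((n:Int) - 3)) (some ((n:Int) + 1))
            = (cs.drop (n-3)).take 4 := by
          have h1 : (n:Int) - 3 = ((n-3 : Nat) : Int) := by omega
          have h2 : (n:Int) + 1 = ((n-3 : Nat) : Int) + ((4:Nat) : Int) := by omega
          rw [h1, h2, PySem.List.slice_natCast_add]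
        have hW4eq : (cs.drop (n-3)).take 4 = (cs.take (n+1)).drop (n-3) := by
          rw [List.drop_take]; congr 1; omega
        have hnotW4 : ¬ ((cs.drop (n-3)).take 4).Nodup := by
          rw [hW4eq]
          intro hnd
          have hs'pos : 0 < s' := by omega
          obtain ⟨hlt, hmem⟩ := hM' hs'pos
          obtain ⟨q, hq1, hq2, hqe⟩ := (mem_take_drop (by omega) (cs[s'-1]'hlt)).1 hmem
          -- two equal chars at distinct positions inside the last-4 window
          have hj1 : s' - 1 - (n-3) < ((cs.take (n+1)).drop (n-3)).length := by
            simp [List.length_drop, List.length_take]; omega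
          have hj2 : q - (n-3) < ((cs.take (n+1)).drop (n-3)).length := by
            simp [List.length_drop, List.length_take]; omega
          have he : ((cs.take (n+1)).drop (n-3))[s' - 1 - (n-3)]'hj1
              = ((cs.take (n+1)).drop (n-3))[q - (n-3)]'hj2 := by
            simp only [List.getElem_drop, List.getElem_take]
            have h1 : cs[n - 3 + (s' - 1 - (n - 3))]'(by omega) = cs[s' - 1]'hlt := by
              congr 1; omega
            have h2 : cs[n - 3 + (q - (n - 3))]'(by omega) = cs[q]'(by omega) := by
              congr 1; omega
            rw [h1, h2, hqe]
          have := (List.Nodup.getElem_inj_iff hnd).1 he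
          omega
        rw [hslice, if_neg (fun h => hnotW4 ((isUnique_iff _).1 h))]
      · have hmax : max n 3 = 3 := by omega
        have hmax' : max (n+1) 3 = 3 := by omega
        rw [hmax, hmax']
termination_by cs.length - n

-- ===== VERDICT (by name: the statement is the Claim_ definition above) =====
theorem part1_spec : Claim_equal_part1 := by
  intro list _
  show part1 list = part1_alt list
  have h := go_main list.toList 0 0 PySem.Dict.empty (by simp) (by simp)
    (by simp) (by simp) (by simp [PySem.Dict.get?_empty]) (by omega)
  simp only [List.drop_zero, Nat.cast_zero] at h
  simp [part1, part1_alt, h]
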